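-- pv_equiv track=rewrite | github.com/GitProger/ITMO-CT-dm-labs | 1/B.py | l_cl
-- ===== SOURCE A (Python) =====
-- import math
-- from functools import reduce
--
-- def l_cl(f):
--     if len(f) == 1:
--         return 1
--     s = int(math.log2(len(f)))
--     for a_map in range(2 * len(f)): # jegalkin koefs
--         ans = 1
--         b_a_map = bin(a_map)[2:].zfill(s + 1)
--         for arg in range(len(f)):
--             b_arg = bin(arg)[2:].zfill(s)
--             jeg = [int(b_a_map[-1])] + [int(b_arg[i]) * int(b_a_map[i]) for i in range(s)]
--             if reduce(lambda a, b: a ^ b, jeg) != int(f[arg]):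
--                 ans = 0
--                 break
--         if ans == 1:
--             return 1
--     return 0
-- ===== SOURCE B (Python) =====
-- def l_cl(f):
--     n = len(f)
--     if n == 1:
--         return 1
--     if any(v not in (0, 1) for v in f):
--         return 0
--     s = n.bit_length() - 1
--     coef = [f[1 << j] ^ f[0] for j in range(s)]
--     for x in range(n):
--         p = f[0]
--         for j in range(s):
--             if (x >> j) & 1:
--                 p ^= coef[j]
--         if p != f[x]:
--             return 0
--     return 1
-- ===== Notes on version B (the rewrite author's own statement) =====
-- stated objective: faster
-- what changed: Instead of brute-forcing all 2n candidate affine maps and re-checking the whole table for each, B derives the unique possible affine candidate (constant = f[0], linear coefficient j = f[2^j]^f[0]) and verifies it in one pass over the table.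
-- outside the precondition, e.g. on l_cl([0, 1, 0]): A returns 0, B returns 1; on l_cl([]): A raises ValueError, B returns 1
import Mathlib
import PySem

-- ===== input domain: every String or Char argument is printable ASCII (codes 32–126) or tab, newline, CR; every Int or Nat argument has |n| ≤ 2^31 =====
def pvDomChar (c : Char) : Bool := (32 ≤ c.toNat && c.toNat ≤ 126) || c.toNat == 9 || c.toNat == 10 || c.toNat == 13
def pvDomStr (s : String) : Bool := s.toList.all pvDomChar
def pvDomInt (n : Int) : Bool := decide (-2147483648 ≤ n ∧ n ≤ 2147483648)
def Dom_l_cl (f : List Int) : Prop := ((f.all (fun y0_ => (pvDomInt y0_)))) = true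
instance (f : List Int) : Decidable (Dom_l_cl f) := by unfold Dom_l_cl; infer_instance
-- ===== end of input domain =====

-- B replaces A's brute-force search over all 2n candidate affine maps (each re-checked against the whole
-- table) by deriving the unique possible affine candidate from f[0] and f at the powers of two and
-- verifying it in one pass: a different, asymptotically faster algorithm.


-- ===== PORT A =====
-- bin(m)[2:] reversed (LSB first): digits of m, no leading zero, bin(0)[2:] handled in pvBin
def pvBinRev : Nat → List Nat
  | 0 => []
  | (n+1) => ((n+1) % 2) :: pvBinRev ((n+1) / 2)

-- bin(m)[2:] as a list of 0/1 digits, MSB first ('0' for m = 0)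
def pvBin (m : Nat) : List Nat := if m = 0 then [0] else (pvBinRev m).reverse

-- str.zfill(k): left-pad with zeros to length k
def pvZfill (l : List Nat) (k : Nat) : List Nat := List.replicate (k - l.length) 0 ++ l

-- reduce(lambda a, b: a ^ b, jeg): fold xor from the head (jeg is always nonempty)
def pvReduceXor : List Nat → Nat
  | [] => 0
  | h :: t => t.foldl Nat.xor h

-- the body of A's inner loop for one (a_map, arg): True iff reduce(^, jeg) == int(f[arg])
def l_cl_check (f : List Int) (s a_map arg : Nat) : Bool :=
  let b_a_map := pvZfill (pvBin a_map) (s + 1)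
  let b_arg := pvZfill (pvBin arg) s
  let jeg := b_a_map.getLastD 0 ::
    (List.range s).map (fun i => (b_arg.getD i 0) * (b_a_map.getD i 0))
  -- f[arg] with arg ∈ range(len(f)) is always in range, so getD is exact here
  decide ((pvReduceXor jeg : Int) = f.getD arg 0)

def l_cl (f : List Int) : Int :=
  if f.length = 1 then 1
  else
    -- int(math.log2(len(f))): exact floor log2 on the lengths Pre_ admits (powers of two)
    let s := Nat.log2 f.length
    -- `any`/`all` mirror Python's early `return 1` / `break`
    if (List.range (2 * f.length)).any (fun a_map =>
        (List.range f.length).all (fun arg => l_cl_check f s a_map arg))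
    then 1 else 0

-- ===== PORT B =====
def l_cl_alt (f : List Int) : Int :=
  let n := f.length
  if n = 1 then 1
  else if f.any (fun v => decide (¬(v = 0 ∨ v = 1))) then 0
  else
    -- n.bit_length() - 1 (truncated subtraction only differs at n = 0, where Python's range(-1) is empty too)
    let s := Nat.size n - 1
    let coef := (List.range s).map (fun j => Int.xor (f.getD (1 <<< j) 0) (f.getD 0 0))
    -- indices 1 <<< j and x are < n on every executed path, so getD is exact here
    if (List.range n).all (fun x =>
        decide (((List.range s).foldl
          (fun p j => if (x >>> j) &&& 1 = 1 then Int.xor p (coef.getD j 0) else p)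
          (f.getD 0 0)) = f.getD x 0))
    then 1 else 0

-- ===== PRECONDITION & SPEC =====
-- Pre_ admits the task's natural domain — truth tables, i.e. lists of power-of-two length — plus every
-- list (of length ≥ 2) containing a non-Boolean entry, where both programs return 0. It excludes []
-- (A raises ValueError from math.log2(0)) and 0/1-lists of non-power-of-two length: malformed truth
-- tables on which A still returns a value but its floor(log2) bit-slicing is accidental (see claim cites).
def Pre_l_cl (f : List Int) : Prop :=
  f.length = 2 ^ Nat.log2 f.length ∨ (2 ≤ f.length ∧ ∃ v ∈ f, ¬(v = 0 ∨ v = 1))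
instance (f : List Int) : Decidable (Pre_l_cl f) := by unfold Pre_l_cl; infer_instance

def pvWitness_l_cl : List Int := [0, 1, 1, 0]

def Spec_l_cl (f : List Int) (out : Int) : Prop := out = l_cl_alt f
instance (f : List Int) (out : Int) : Decidable (Spec_l_cl f out) := by unfold Spec_l_cl; infer_instance

-- ===== CLAIM (what is proved, stated in full; the proofs are below) =====
def Claim_equal_l_cl : Prop := ∀ (f : List Int), Dom_l_cl f → Pre_l_cl f → Spec_l_cl f (l_cl f)

-- ===== LEMMAS AND PROOFS =====

theorem pvBinRev_getD (m j : Nat) : (pvBinRev m).getD j 0 = m / 2^j % 2 := by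
  induction m using Nat.strong_induction_on generalizing j with
  | _ m ih =>
    match m with
    | 0 => simp [pvBinRev]
    | (n+1) =>
      match j with
      | 0 => simp [pvBinRev]
      | (j+1) =>
        have h2 : (n+1)/2 < n+1 := Nat.div_lt_self (Nat.succ_pos n) (by omega)
        simp only [pvBinRev, List.getD_cons_succ]
        rw [ih _ h2 j, Nat.div_div_eq_div_mul, pow_succ, Nat.mul_comm]

theorem pvBinRev_lt (m : Nat) : m < 2 ^ (pvBinRev m).length := by
  induction m using Nat.strong_induction_on with
  | _ m ih =>
    match m with
    | 0 => simp [pvBinRev]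
    | (n+1) =>
      have h2 : (n+1)/2 < n+1 := Nat.div_lt_self (Nat.succ_pos n) (by omega)
      have := ih _ h2
      simp only [pvBinRev, List.length_cons, pow_succ]
      omega

theorem pvBinRev_len_le (m k : Nat) (h : m < 2^k) : (pvBinRev m).length ≤ k := by
  induction m using Nat.strong_induction_on generalizing k with
  | _ m ih =>
    match m with
    | 0 => simp [pvBinRev]
    | (n+1) =>
      have h2 : (n+1)/2 < n+1 := Nat.div_lt_self (Nat.succ_pos n) (by omega)
      have hk : 1 ≤ k := by
        rcases Nat.eq_zero_or_pos k with rfl | h'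
        · simp at h
        · exact h'
      have hlt : (n+1)/2 < 2^(k-1) := by
        have : 2^k = 2 * 2^(k-1) := by
          rw [← pow_succ']
          congr 1; omega
        omega
      have := ih _ h2 (k-1) hlt
      simp only [pvBinRev, List.length_cons]
      omega

theorem pvBin_len_le (m k : Nat) (hk : 1 ≤ k) (hm : m < 2^k) : (pvBin m).length ≤ k := by
  unfold pvBin
  split
  · simpa using hk
  · simpa using pvBinRev_len_le m k hm

theorem pvBin_lt (m : Nat) : m < 2 ^ (pvBin m).length := by
  unfold pvBin
  split
  · simp_all
  · simpa using pvBinRev_lt m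

theorem pvBin_getD (m p : Nat) (hp : p < (pvBin m).length) :
    (pvBin m).getD p 0 = m / 2^((pvBin m).length - 1 - p) % 2 := by
  by_cases h : m = 0
  · subst h
    have hp1 : p < 1 := by simpa [pvBin] using hp
    have : p = 0 := by omega
    subst this
    simp [pvBin]
  · have he : pvBin m = (pvBinRev m).reverse := by simp [pvBin, h]
    rw [he] at hp ⊢
    simp only [List.length_reverse] at hp ⊢
    rw [List.getD_eq_getElem _ 0 (by simpa using hp), List.getElem_reverse]
    have := pvBinRev_getD m ((pvBinRev m).length - 1 - p)
    rw [← this, List.getD_eq_getElem _ 0 (by omega)]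

theorem pvZfill_pvBin_eq (k m : Nat) (hk : 1 ≤ k) (hm : m < 2^k) :
    pvZfill (pvBin m) k = (List.range k).map (fun i => m / 2^(k-1-i) % 2) := by
  have hlen := pvBin_len_le m k hk hm
  apply List.ext_getElem
  · simp [pvZfill]; omega
  · intro i h1 h2
    have hik : i < k := by simpa using h2
    simp only [List.getElem_map, List.getElem_range]
    simp only [pvZfill] at h1 ⊢
    rw [List.getElem_append]
    split
    · next hi =>
      simp only [List.length_replicate] at hi
      simp only [List.getElem_replicate]
      have hge : (pvBin m).length ≤ k - 1 - i := by omega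
      have : m < 2^(k-1-i) := lt_of_lt_of_le (pvBin_lt m) (Nat.pow_le_pow_right (by omega) hge)
      rw [Nat.div_eq_of_lt this]
    · next hi =>
      simp only [List.length_replicate] at hi ⊢
      have hplen : i - (k - (pvBin m).length) < (pvBin m).length := by
        simp only [List.length_append, List.length_replicate] at h1
        omega
      rw [← List.getD_eq_getElem _ 0 hplen, pvBin_getD m _ hplen]
      have hexp : (pvBin m).length - 1 - (i - (k - (pvBin m).length)) = k - 1 - i := by omega
      rw [hexp]

def pvX (c : Nat) (cf : Nat → Nat) (s x : Nat) : Nat :=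
  (List.range s).foldl (fun p j => p ^^^ (x / 2^j % 2) * cf j) c

theorem pvX_succ (c : Nat) (cf : Nat → Nat) (s x : Nat) :
    pvX c cf (s+1) x = pvX c cf s x ^^^ (x / 2^s % 2) * cf s := by
  simp [pvX, List.range_succ]

theorem pvX_zero_bits (c : Nat) (cf : Nat → Nat) (s x : Nat) (h : ∀ j < s, x / 2^j % 2 = 0) :
    pvX c cf s x = c := by
  induction s with
  | zero => simp [pvX]
  | succ s ih =>
    rw [pvX_succ, h s (by omega)]
    simp [ih (fun j hj => h j (by omega))]

theorem pvX_pow (c : Nat) (cf : Nat → Nat) (s j0 : Nat) (hj : j0 < s) :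
    pvX c cf s (2^j0) = c ^^^ cf j0 := by
  induction s with
  | zero => omega
  | succ s ih =>
    rw [pvX_succ]
    by_cases h : j0 = s
    · subst h
      have hz : ∀ j < j0, 2^j0 / 2^j % 2 = 0 := by
        intro j hjj
        rw [Nat.pow_div (by omega) (by omega)]
        have : 2 ∣ 2^(j0 - j) := dvd_pow_self 2 (by omega)
        omega
      rw [pvX_zero_bits c cf j0 _ hz, Nat.div_self (by positivity), Nat.one_mod, one_mul]
    · have hlt : 2^j0 < 2^s := Nat.pow_lt_pow_right (by omega) (by omega)
      rw [Nat.div_eq_of_lt hlt]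
      simp [ih (by omega)]

theorem pvX_congr (c1 c2 : Nat) (cf1 cf2 : Nat → Nat) (s x : Nat)
    (h1 : c1 = c2) (h2 : ∀ j < s, cf1 j = cf2 j) : pvX c1 cf1 s x = pvX c2 cf2 s x := by
  subst h1
  unfold pvX
  apply PySem.List.foldl_congr_mem
  intro p j hj
  rw [h2 j (by simpa using hj)]

theorem pvXor_le_one {a b : Nat} (ha : a ≤ 1) (hb : b ≤ 1) : a ^^^ b ≤ 1 := by
  interval_cases a <;> interval_cases b <;> decide

def pvOfBits : List Nat → Nat
  | [] => 0
  | b :: t => b + 2 * pvOfBits t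

theorem pvOfBits_digit (l : List Nat) (hl : ∀ b ∈ l, b ≤ 1) (j : Nat) :
    pvOfBits l / 2^j % 2 = l.getD j 0 := by
  induction l generalizing j with
  | nil => simp [pvOfBits]
  | cons b t ih =>
    have hb : b ≤ 1 := hl b (by simp)
    have ht : ∀ c ∈ t, c ≤ 1 := fun c hc => hl c (by simp [hc])
    match j with
    | 0 => simp [pvOfBits]; omega
    | (j+1) =>
      simp only [pvOfBits, List.getD_cons_succ]
      rw [pow_succ', ← Nat.div_div_eq_div_mul]
      have : (b + 2 * pvOfBits t) / 2 = pvOfBits t := by omega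
      rw [this, ih ht j]

theorem pvOfBits_lt (l : List Nat) (hl : ∀ b ∈ l, b ≤ 1) : pvOfBits l < 2 ^ l.length := by
  induction l with
  | nil => simp [pvOfBits]
  | cons b t ih =>
    have hb : b ≤ 1 := hl b (by simp)
    have := ih (fun c hc => hl c (by simp [hc]))
    simp only [pvOfBits, List.length_cons, pow_succ]
    omega

theorem pvRange_reverse (k : Nat) :
    (List.range k).reverse = (List.range k).map (fun i => k - 1 - i) := by
  apply List.ext_getElem
  · simp
  · intro i h1 h2
    simp only [List.length_reverse, List.length_range] at h1
    simp [List.getElem_reverse]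

theorem pvFoldl_xor_reverse (g : Nat → Nat) (s b : Nat) :
    ((List.range s).map g).foldl Nat.xor b
      = (List.range s).foldl (fun p j => p ^^^ g (s - 1 - j)) b := by
  have hrc : RightCommutative Nat.xor := ⟨by
    intro p a c
    show p ^^^ a ^^^ c = p ^^^ c ^^^ a
    rw [Nat.xor_assoc, Nat.xor_comm a c, ← Nat.xor_assoc]⟩
  have hperm : (((List.range s).map g).reverse).Perm ((List.range s).map g) :=
    List.reverse_perm _
  rw [← hperm.foldl_eq b, ← List.map_reverse, pvRange_reverse, List.map_map, List.foldl_map]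
  rfl

theorem l_cl_check_eq (f : List Int) (s a x : Nat) (hs : 1 ≤ s) (ha : a < 2^(s+1)) (hx : x < 2^s) :
    l_cl_check f s a x =
      decide ((pvX (a % 2) (fun j => a / 2^(j+1) % 2) s x : Int) = f.getD x 0) := by
  have hlast : ((List.range (s+1)).map (fun i => a / 2^(s+1-1-i) % 2)).getLastD 0 = a % 2 := by
    rw [List.range_succ, List.map_append]
    simp
  have hmap : (List.range s).map (fun i =>
        (((List.range s).map (fun i => x / 2^(s-1-i) % 2)).getD i 0) *
        (((List.range (s+1)).map (fun i => a / 2^(s+1-1-i) % 2)).getD i 0))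
      = (List.range s).map (fun i => (x / 2^(s-1-i) % 2) * (a / 2^(s-i) % 2)) := by
    apply List.map_congr_left
    intro i hi
    have hi' : i < s := by simpa using hi
    rw [PySem.List.getD_map_range _ _ _ _ hi', PySem.List.getD_map_range _ _ _ _ (by omega)]
    have e : s + 1 - 1 - i = s - i := by omega
    rw [e]
  have hval : ((List.range s).map (fun i => (x / 2^(s-1-i) % 2) * (a / 2^(s-i) % 2))).foldl Nat.xor (a % 2)
      = pvX (a % 2) (fun j => a / 2^(j+1) % 2) s x := by
    rw [pvFoldl_xor_reverse]
    unfold pvX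
    apply PySem.List.foldl_congr_mem
    intro p j hj
    have hj' : j < s := by simpa using hj
    have e1 : s - 1 - (s - 1 - j) = j := by omega
    have e2 : s - (s - 1 - j) = j + 1 := by omega
    rw [e1, e2]
  simp only [l_cl_check]
  rw [pvZfill_pvBin_eq (s+1) a (by omega) ha, pvZfill_pvBin_eq s x hs hx, hlast, hmap]
  simp only [pvReduceXor]
  simp only [hval]

def pvC0 (f : List Int) : Nat := (f.getD 0 0).toNat

def pvCfB (f : List Int) (j : Nat) : Nat := (f.getD (2^j) 0).toNat ^^^ pvC0 f

theorem pvGetD_mem (f : List Int) (i : Nat) (hi : i < f.length) : f.getD i 0 ∈ f := by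
  rw [List.getD_eq_getElem _ _ hi]
  exact List.getElem_mem hi

theorem l_cl_alt_fold_gen (f : List Int) (s x : Nat) (hn : f.length = 2^s)
    (hgood : ∀ v ∈ f, v = 0 ∨ v = 1) (l : List Nat) (hl : ∀ j ∈ l, j < s)
    (pn : Nat) (hp : pn ≤ 1) :
    (l.foldl
      (fun p j => if (x >>> j) &&& 1 = 1 then
          Int.xor p (((List.range s).map (fun j => Int.xor (f.getD (1 <<< j) 0) (f.getD 0 0))).getD j 0)
        else p)
      (pn : Int)) = ((l.foldl (fun p j => p ^^^ (x / 2^j % 2) * (pvCfB f j)) pn : Nat) : Int) := by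
  induction l generalizing pn with
  | nil => rfl
  | cons j t ih =>
    have hj : j < s := hl j (by simp)
    have ht : ∀ i ∈ t, i < s := fun i hi => hl i (by simp [hi])
    have hf0 : f.getD 0 0 = 0 ∨ f.getD 0 0 = 1 :=
      hgood _ (pvGetD_mem f 0 (by rw [hn]; positivity))
    have hfj : f.getD (2^j) 0 = 0 ∨ f.getD (2^j) 0 = 1 :=
      hgood _ (pvGetD_mem f (2^j) (by rw [hn]; exact Nat.pow_lt_pow_right (by omega) hj))
    have hcoef : ((List.range s).map (fun j => Int.xor (f.getD (1 <<< j) 0) (f.getD 0 0))).getD j 0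
        = Int.xor (f.getD (2^j) 0) (f.getD 0 0) := by
      rw [PySem.List.getD_map_range _ _ _ _ hj, Nat.one_shiftLeft]
    have hbit : (x >>> j) &&& 1 = x / 2^j % 2 := by
      rw [Nat.shiftRight_eq_div_pow, Nat.and_one_is_mod]
    simp only [List.foldl_cons, hcoef, hbit]
    have hmod : x / 2^j % 2 = 0 ∨ x / 2^j % 2 = 1 := by omega
    rcases hmod with hm | hm
    · rw [hm]
      simp only [Nat.zero_mul, Nat.xor_zero]
      rw [if_neg (by omega)]
      exact ih ht pn hp
    · rw [hm, if_pos rfl]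
      have hstep : Int.xor (pn : Int) (Int.xor (f.getD (2^j) 0) (f.getD 0 0))
          = ((pn ^^^ 1 * pvCfB f j : Nat) : Int) := by
        unfold pvCfB pvC0
        interval_cases pn <;> rcases hfj with h1 | h1 <;> rcases hf0 with h2 | h2 <;>
          rw [h1, h2] <;> decide
      rw [hstep]
      exact ih ht _ (by
        have : pvCfB f j ≤ 1 := by
          unfold pvCfB pvC0
          rcases hfj with h1 | h1 <;> rcases hf0 with h2 | h2 <;> rw [h1, h2] <;> decide
        have h2 : 1 * pvCfB f j ≤ 1 := by omega
        exact pvXor_le_one hp h2)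

theorem pvC0_le_one (f : List Int) (hgood : ∀ v ∈ f, v = 0 ∨ v = 1) : pvC0 f ≤ 1 := by
  unfold pvC0
  rcases Nat.lt_or_ge 0 f.length with h | h
  · rcases hgood _ (pvGetD_mem f 0 h) with h1 | h1 <;> rw [h1] <;> decide
  · rw [List.getD_eq_default _ _ (by omega)]; decide

theorem pvCfB_le_one (f : List Int) (hgood : ∀ v ∈ f, v = 0 ∨ v = 1) (j : Nat) : pvCfB f j ≤ 1 := by
  have h0 := pvC0_le_one f hgood
  unfold pvCfB
  have h2 : (f.getD (2^j) 0).toNat ≤ 1 := by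
    rcases Nat.lt_or_ge (2^j) f.length with h | h
    · rcases hgood _ (pvGetD_mem f (2^j) h) with h1 | h1 <;> rw [h1] <;> decide
    · rw [List.getD_eq_default _ _ (by omega)]; decide
  exact pvXor_le_one h2 h0

theorem pv_exists_iff (f : List Int) (s : Nat) (hn : f.length = 2^s)
    (hgood : ∀ v ∈ f, v = 0 ∨ v = 1) :
    (∃ a < 2^(s+1), ∀ x < f.length,
        ((pvX (a % 2) (fun j => a / 2^(j+1) % 2) s x : Nat) : Int) = f.getD x 0)
    ↔ (∀ x < f.length, ((pvX (pvC0 f) (pvCfB f) s x : Nat) : Int) = f.getD x 0) := by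
  constructor
  · rintro ⟨a, ha, hA⟩ x hx
    have h0 : ((a % 2 : Nat) : Int) = f.getD 0 0 := by
      have h := hA 0 (by rw [hn]; positivity)
      rwa [pvX_zero_bits _ _ _ _ (by intro j hj; simp)] at h
    have hc0 : pvC0 f = a % 2 := by
      unfold pvC0
      rw [← h0, Int.toNat_natCast]
    have hcf : ∀ j < s, pvCfB f j = a / 2^(j+1) % 2 := by
      intro j hj
      have hxj := hA (2^j) (by rw [hn]; exact Nat.pow_lt_pow_right (by omega) hj)
      rw [pvX_pow _ _ _ _ hj] at hxj
      unfold pvCfB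
      rw [← hxj, Int.toNat_natCast, hc0,
        Nat.xor_comm (a % 2) (a / 2^(j+1) % 2), Nat.xor_assoc, Nat.xor_self, Nat.xor_zero]
    rw [pvX_congr _ _ _ _ s x hc0 hcf]
    exact hA x hx
  · intro hB
    have hb01 : ∀ b ∈ pvC0 f :: (List.range s).map (pvCfB f), b ≤ 1 := by
      intro b hb
      rcases List.mem_cons.mp hb with rfl | hb
    -- pvC0 case
      · exact pvC0_le_one f hgood
      · obtain ⟨j, _, rfl⟩ := List.mem_map.mp hb
        exact pvCfB_le_one f hgood j
    have ha : pvOfBits (pvC0 f :: (List.range s).map (pvCfB f)) < 2^(s+1) := by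
      have := pvOfBits_lt _ hb01
      simpa [Nat.add_comm] using this
    refine ⟨pvOfBits (pvC0 f :: (List.range s).map (pvCfB f)), ha, ?_⟩
    intro x hx
    have hmod : pvOfBits (pvC0 f :: (List.range s).map (pvCfB f)) % 2 = pvC0 f := by
      have := pvOfBits_digit _ hb01 0
      simpa using this
    have hcf : ∀ j < s, pvOfBits (pvC0 f :: (List.range s).map (pvCfB f)) / 2^(j+1) % 2 = pvCfB f j := by
      intro j hj
      have h := pvOfBits_digit _ hb01 (j+1)
      rwa [List.getD_cons_succ, PySem.List.getD_map_range _ _ _ _ hj] at h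
    rw [pvX_congr _ _ _ _ s x hmod hcf]
    exact hB x hx

theorem pvBinRev_mem_le (m : Nat) : ∀ b ∈ pvBinRev m, b ≤ 1 := by
  induction m using Nat.strong_induction_on with
  | _ m ih =>
    match m with
    | 0 => simp [pvBinRev]
    | (n+1) =>
      intro b hb
      simp only [pvBinRev] at hb
      rcases List.mem_cons.mp hb with rfl | hb
      · omega
      · exact ih _ (Nat.div_lt_self (Nat.succ_pos n) (by omega)) b hb

theorem pvZfillBin_mem_le (m k : Nat) : ∀ b ∈ pvZfill (pvBin m) k, b ≤ 1 := by
  intro b hb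
  rcases List.mem_append.mp hb with hb | hb
  · rw [List.eq_of_mem_replicate hb]
    omega
  · unfold pvBin at hb
    split at hb
    · simp at hb
      omega
    · exact pvBinRev_mem_le m b (List.mem_reverse.mp hb)

theorem pvZfillBin_getD_le (m k i : Nat) : (pvZfill (pvBin m) k).getD i 0 ≤ 1 := by
  rcases Nat.lt_or_ge i (pvZfill (pvBin m) k).length with h | h
  · rw [List.getD_eq_getElem _ _ h]
    exact pvZfillBin_mem_le m k _ (List.getElem_mem h)
  · rw [List.getD_eq_default _ _ h]
    omega

theorem pvZfillBin_getLastD_le (m k : Nat) : (pvZfill (pvBin m) k).getLastD 0 ≤ 1 := by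
  have hb : pvBin m ≠ [] := by
    unfold pvBin
    split
    · simp
    · next h =>
      match m, h with
      | (n+1), _ => simp [pvBinRev]
  have hne : pvZfill (pvBin m) k ≠ [] := by
    unfold pvZfill
    exact List.append_ne_nil_of_right_ne_nil _ hb
  rw [List.getLastD_eq_getLast?, List.getLast?_eq_some_getLast hne]
  exact pvZfillBin_mem_le m k _ (List.getLast_mem hne)

theorem pvFoldXor_le (t : List Nat) (h : Nat) (hh : h ≤ 1) (ht : ∀ b ∈ t, b ≤ 1) :
    t.foldl Nat.xor h ≤ 1 := by
  induction t generalizing h with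
  | nil => simpa using hh
  | cons b t ih =>
    exact ih _ (pvXor_le_one hh (ht b (by simp))) (fun c hc => ht c (by simp [hc]))

theorem l_cl_check_le (f : List Int) (s a x : Nat) :
    ∃ N : Nat, N ≤ 1 ∧ l_cl_check f s a x = decide ((N : Int) = f.getD x 0) := by
  refine ⟨pvReduceXor ((pvZfill (pvBin a) (s+1)).getLastD 0 ::
    (List.range s).map (fun i =>
      ((pvZfill (pvBin x) s).getD i 0) * ((pvZfill (pvBin a) (s+1)).getD i 0))), ?_, rfl⟩
  simp only [pvReduceXor]
  apply pvFoldXor_le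
  · exact pvZfillBin_getLastD_le a (s+1)
  · intro b hb
    obtain ⟨i, _, rfl⟩ := List.mem_map.mp hb
    exact Left.mul_le_one (pvZfillBin_getD_le x s i) (pvZfillBin_getD_le a (s+1) i)

-- both programs return 0 on any list of length ≠ 1 containing a non-Boolean entry
theorem l_cl_main_bad (f : List Int) (h1 : ¬ f.length = 1)
    (hbad : ∃ v ∈ f, ¬(v = 0 ∨ v = 1)) : l_cl f = l_cl_alt f := by
  obtain ⟨v, hv, hv01⟩ := hbad
  have hB : f.any (fun v => decide (¬(v = 0 ∨ v = 1))) = true := by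
    rw [List.any_eq_true]
    exact ⟨v, hv, by simpa using hv01⟩
  obtain ⟨i, hi, hfi⟩ := List.mem_iff_getElem.mp hv
  have hA : (List.range (2 * f.length)).any (fun a_map =>
      (List.range f.length).all (fun arg => l_cl_check f (Nat.log2 f.length) a_map arg)) = false := by
    rw [List.any_eq_false]
    intro a _ hall
    rw [List.all_eq_true] at hall
    have hchk := hall i (by simpa using hi)
    obtain ⟨N, hle, heq⟩ := l_cl_check_le f (Nat.log2 f.length) a i
    rw [heq] at hchk
    have hval := of_decide_eq_true hchk
    rw [List.getD_eq_getElem _ _ hi, hfi] at hval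
    rcases Nat.le_one_iff_eq_zero_or_eq_one.mp hle with h | h
    · rw [h] at hval
      exact hv01 (Or.inl (by exact_mod_cast hval.symm))
    · rw [h] at hval
      exact hv01 (Or.inr (by exact_mod_cast hval.symm))
  simp only [l_cl, l_cl_alt]
  rw [if_neg h1, if_neg h1, hA, hB]
  simp

theorem l_cl_main (f : List Int)
    (hpre : f.length = 2 ^ Nat.log2 f.length ∨ (2 ≤ f.length ∧ ∃ v ∈ f, ¬(v = 0 ∨ v = 1))) :
    l_cl f = l_cl_alt f := by
  by_cases h1 : f.length = 1
  · simp [l_cl, l_cl_alt, h1]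
  · by_cases hbad : ∃ v ∈ f, ¬(v = 0 ∨ v = 1)
    · exact l_cl_main_bad f h1 hbad
    · have hpre' : f.length = 2 ^ Nat.log2 f.length := by
        rcases hpre with h | ⟨_, h⟩
        · exact h
        · exact absurd h hbad
      have hs1 : 1 ≤ Nat.log2 f.length := by
        by_contra hc
        have h0 : Nat.log2 f.length = 0 := by omega
        rw [h0] at hpre'
        simp at hpre'
        exact h1 hpre'
      set s := Nat.log2 f.length with hsdef
      have hn : f.length = 2^s := hpre'
      have hsize : Nat.size f.length - 1 = s := by rw [hn, Nat.size_pow]; omega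
      have h2n : 2 * f.length = 2^(s+1) := by rw [hn, pow_succ, Nat.mul_comm]
      have hgood : ∀ v ∈ f, v = 0 ∨ v = 1 := by
        intro v hv
        by_contra hc
        exact hbad ⟨v, hv, hc⟩
      have hB : f.any (fun v => decide (¬(v = 0 ∨ v = 1))) = false := by
        rw [List.any_eq_false]
        intro v hv hc
        exact (not_not_intro (hgood v hv)) (of_decide_eq_true hc)
      have hc0cast : ((pvC0 f : Nat) : Int) = f.getD 0 0 := by
        unfold pvC0
        rcases hgood _ (pvGetD_mem f 0 (by rw [hn]; positivity)) with h | h <;> rw [h] <;> decide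
      have hkey : ((List.range (2 * f.length)).any (fun a_map =>
            (List.range f.length).all (fun arg => l_cl_check f s a_map arg)))
          = ((List.range f.length).all (fun x =>
            decide (((List.range s).foldl
              (fun p j => if (x >>> j) &&& 1 = 1 then
                Int.xor p (((List.range s).map (fun j =>
                  Int.xor (f.getD (1 <<< j) 0) (f.getD 0 0))).getD j 0)
                else p)
              (f.getD 0 0)) = f.getD x 0))) := by
        rw [Bool.eq_iff_iff, List.any_eq_true, List.all_eq_true]
        constructor
        · rintro ⟨a, ha, hall⟩ x hx
          have hx' : x < f.length := by simpa using hx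
          have ha' : a < 2^(s+1) := by rw [← h2n]; simpa using ha
          rw [List.all_eq_true] at hall
          have hAgree : ∀ y < f.length,
              ((pvX (a % 2) (fun j => a / 2^(j+1) % 2) s y : Nat) : Int) = f.getD y 0 := by
            intro y hy
            have := hall y (by simpa using hy)
            rw [l_cl_check_eq f s a y hs1 ha' (by rw [← hn]; exact hy)] at this
            exact of_decide_eq_true this
          have hBside := (pv_exists_iff f s hn hgood).mp ⟨a, ha', hAgree⟩ x hx'
          have hfold := l_cl_alt_fold_gen f s x hn hgood (List.range s)
            (fun j hj => by simpa using hj) (pvC0 f) (pvC0_le_one f hgood)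
          rw [hc0cast] at hfold
          rw [hfold]
          exact decide_eq_true (by exact_mod_cast hBside)
        · intro hall
          have hBAgree : ∀ x < f.length, ((pvX (pvC0 f) (pvCfB f) s x : Nat) : Int) = f.getD x 0 := by
            intro x hx
            have hthis := hall x (by simpa using hx)
            have hfold := l_cl_alt_fold_gen f s x hn hgood (List.range s)
              (fun j hj => by simpa using hj) (pvC0 f) (pvC0_le_one f hgood)
            rw [hc0cast] at hfold
            rw [hfold] at hthis
            exact_mod_cast of_decide_eq_true hthis
          obtain ⟨a, ha', hAgree⟩ := (pv_exists_iff f s hn hgood).mpr hBAgree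
          refine ⟨a, by rw [h2n]; simpa using ha', ?_⟩
          rw [List.all_eq_true]
          intro arg harg
          have harg' : arg < f.length := by simpa using harg
          rw [l_cl_check_eq f s a arg hs1 ha' (by rw [← hn]; exact harg')]
          exact decide_eq_true (hAgree arg harg')
      simp only [l_cl, l_cl_alt]
      rw [if_neg h1, if_neg h1, hB, hsize, hkey]
      simp



-- ===== VERDICT (by name: the statement is the Claim_ definition above) =====
theorem l_cl_spec : Claim_equal_l_cl := by
  intro f _ hpre
  unfold Spec_l_cl
  exact l_cl_main f hpre
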